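-- pv_equiv track=rewrite | github.com/acdh-oeaw/apis-core | apis_core/apis_tei/tei.py | stand_off_to_inline
-- ===== SOURCE A (Python) =====
-- from collections import defaultdict
--
-- def stand_off_to_inline(text, annot):
--     """
--     Function from: https://gist.github.com/emsrc/c7aba4506214a20505ed
--
--     Convert stand-off annotation to inline annotation
--     Parameters
--     ----------
--     text : str
--         unannotated text
--     annot: list of tuples
--         stand-off annotation as tuples in the form (i, j, tag)
--         where integers i and j are the start and end character offset,
--         and tag is a string for the tag label and - optionally - attributes.
--     Returns
--     -------
--     inline: str
--         text in xml format with inline annotation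
--     Notes
--     -----
--     Will not detect partly overlapping text spans, which will give rise
--     to ill-formed xml.
--     """
--     # sort on decreasing span size
--     annot.sort(key=lambda t: t[1] - t[0], reverse=True)
--
--     # create dict mapping offsets to tags
--     offsets2tags = defaultdict(list)
--
--     for start, end, tag in annot:
--         offsets2tags[start].append("<{}>".format(tag))
--         offsets2tags[end].insert(0, "</{}>".format(tag.split()[0]))
--
--     # merge text and tags
--     parts = []
--     i = None
--
--     for j in sorted(offsets2tags.keys()) + [None]:
--         parts.append(text[i:j])
--         tags = "".join(offsets2tags[j])
--         parts.append(tags)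
--         i = j
--
--     return "".join(parts)
-- ===== SOURCE B (Python) =====
-- def stand_off_to_inline(text, annot):
--     # Same return value as A; also sorts annot in place like A (mutation preserved).
--     annot.sort(key=lambda t: t[1] - t[0], reverse=True)
--     positions = sorted({t[0] for t in annot} | {t[1] for t in annot})
--     out = []
--     prev = None
--     for pos in positions:
--         out.append(text[prev:pos])
--         out.extend("</{}>".format(t[2].split()[0]) for t in reversed(annot) if t[1] == pos)
--         out.extend("<{}>".format(t[2]) for t in annot if t[0] == pos)
--         prev = pos
--     out.append(text[prev:])
--     return "".join(out)
-- ===== Notes on version B (the rewrite author's own statement) =====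
-- stated objective: alternative
-- what changed: Replaces the defaultdict offset->tags index (append/insert-front) and dict-key walk by a sorted set of offsets walked once, emitting closes and opens at each offset by direct scans of the span-sorted annotation list (reversed for closes); no dictionary at all.
import Mathlib
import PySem

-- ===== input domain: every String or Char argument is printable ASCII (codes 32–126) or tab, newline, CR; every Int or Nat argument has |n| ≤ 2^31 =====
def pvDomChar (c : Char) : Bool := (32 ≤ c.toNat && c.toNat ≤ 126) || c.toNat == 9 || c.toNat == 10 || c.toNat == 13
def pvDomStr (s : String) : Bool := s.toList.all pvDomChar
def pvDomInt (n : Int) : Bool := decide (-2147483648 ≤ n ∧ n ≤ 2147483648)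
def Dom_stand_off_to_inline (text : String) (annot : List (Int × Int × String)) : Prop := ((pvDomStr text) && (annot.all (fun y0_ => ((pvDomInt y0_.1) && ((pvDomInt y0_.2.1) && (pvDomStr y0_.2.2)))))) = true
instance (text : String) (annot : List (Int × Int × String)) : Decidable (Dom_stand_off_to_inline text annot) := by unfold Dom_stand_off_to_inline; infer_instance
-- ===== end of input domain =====

-- B replaces A's defaultdict offset->tags index by a sorted offset set with direct scans of the
-- span-sorted annotations (objective: alternative, no dict).  Both A and B sort `annot` in place
-- identically (Python side); the theorems below are about the return value.

-- ===== PORT A =====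
-- "<{}>".format(tag)
def pvFmtOpen (tag : String) : String := "<" ++ tag ++ ">"
-- "</{}>".format(tag.split()[0]); Python raises IndexError when tag.split() == [] — those inputs
-- are excluded by Pre_ below, `headD ""` marks the spot.
def pvFmtClose (tag : String) : String := "</" ++ ((PySem.Str.split₀ tag).headD "") ++ ">"

def stand_off_to_inline (text : String) (annot : List (Int × Int × String)) : String :=
  -- annot.sort(key=lambda t: t[1] - t[0], reverse=True)
  let sa := PySem.List.sorted annot (fun t => t.2.1 - t.1) true
  -- offsets2tags = defaultdict(list); append "<tag>" at start, insert "</tag0>" at front at end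
  let d : PySem.Dict Int (List String) :=
    sa.foldl (fun d t =>
      (PySem.Dict.modify d t.1 [] (fun v => v ++ [pvFmtOpen t.2.2])).modify t.2.1 []
        (fun v => pvFmtClose t.2.2 :: v)) PySem.Dict.empty
  -- for j in sorted(offsets2tags.keys()) + [None]: parts.append(text[i:j]); parts.append("".join(d[j])); i = j
  let ks := (PySem.List.sorted d.keys (fun k => k) false).map Option.some ++ [none]
  let res := ks.foldl (fun (acc : List String × Option Int) j =>
      (acc.1 ++ [PySem.Str.slice text acc.2 j,
                 PySem.Str.join "" (match j with | some k => d.getD k [] | none => [])], j))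
    ([], none)
  PySem.Str.join "" res.1

-- ===== PORT B =====
def stand_off_to_inline_alt (text : String) (annot : List (Int × Int × String)) : String :=
  -- annot.sort(key=lambda t: t[1] - t[0], reverse=True)
  let sa := PySem.List.sorted annot (fun t => t.2.1 - t.1) true
  -- positions = sorted({t[0] for t in annot} | {t[1] for t in annot})
  let positions := PySem.List.sorted
    (PySem.Set.union (PySem.Set.ofList (sa.map (fun t => t.1)))
                     (PySem.Set.ofList (sa.map (fun t => t.2.1)))) (fun k => k) false
  -- one pass over positions: text segment, closes from reversed(annot), opens from annot
  let res := positions.foldl (fun (acc : List String × Option Int) pos =>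
      (acc.1 ++ [PySem.Str.slice text acc.2 (some pos)]
            ++ sa.reverse.filterMap (fun t => if t.2.1 == pos then some (pvFmtClose t.2.2) else none)
            ++ sa.filterMap (fun t => if t.1 == pos then some (pvFmtOpen t.2.2) else none),
       some pos)) ([], none)
  PySem.Str.join "" (res.1 ++ [PySem.Str.slice text res.2 none])

-- ===== PRECONDITION & SPEC =====
-- Pre_ excludes exactly the inputs where Python A raises (IndexError from tag.split()[0] when a
-- tag is empty or whitespace-only); Python B raises there too.
def Pre_stand_off_to_inline (text : String) (annot : List (Int × Int × String)) : Prop :=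
  ∀ t ∈ annot, PySem.Str.split₀ t.2.2 ≠ []
instance (text : String) (annot : List (Int × Int × String)) : Decidable (Pre_stand_off_to_inline text annot) := by unfold Pre_stand_off_to_inline; infer_instance

def pvWitness_stand_off_to_inline : String × (List (Int × Int × String)) :=
  ("hello world", [(0, 5, "w id=1"), (6, 11, "x"), (0, 11, "s")])

def Spec_stand_off_to_inline (text : String) (annot : List (Int × Int × String)) (out : String) : Prop := out = stand_off_to_inline_alt text annot
instance (text : String) (annot : List (Int × Int × String)) (out : String) : Decidable (Spec_stand_off_to_inline text annot out) := by unfold Spec_stand_off_to_inline; infer_instance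

-- ===== CLAIM (what is proved, stated in full; the proofs are below) =====
def Claim_equal_stand_off_to_inline : Prop := ∀ (text : String) (annot : List (Int × Int × String)), Dom_stand_off_to_inline text annot → Pre_stand_off_to_inline text annot → Spec_stand_off_to_inline text annot (stand_off_to_inline text annot)


-- ===== LEMMAS AND PROOFS =====

-- the closing tags an annotation list contributes at offset k, in list order
def pvClo (sa : List (Int × Int × String)) (k : Int) : List String :=
  sa.filterMap (fun t => if t.2.1 == k then some (pvFmtClose t.2.2) else none)
-- the opening tags at offset k, in list order
def pvOp (sa : List (Int × Int × String)) (k : Int) : List String :=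
  sa.filterMap (fun t => if t.1 == k then some (pvFmtOpen t.2.2) else none)

-- A's dict value at any key k after the build loop
theorem pv_dict_getD (sa : List (Int × Int × String)) :
    ∀ (d : PySem.Dict Int (List String)) (k : Int),
      (sa.foldl (fun d t =>
        (PySem.Dict.modify d t.1 [] (fun v => v ++ [pvFmtOpen t.2.2])).modify t.2.1 []
          (fun v => pvFmtClose t.2.2 :: v)) d).getD k []
      = (pvClo sa k).reverse ++ d.getD k [] ++ pvOp sa k := by
  induction sa with
  | nil => intro d k; simp [pvClo, pvOp]
  | cons t rest ih =>
    intro d k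
    obtain ⟨s, e, tag⟩ := t
    simp only [List.foldl_cons, ih, pvClo, pvOp, List.filterMap_cons, PySem.Dict.getD_modify,
      beq_iff_eq]
    by_cases he : e = k <;> by_cases hs : s = k
    · subst he hs
      simp [List.append_assoc]
    · subst he
      have h1 : ¬e = s := fun h => hs h.symm
      simp [hs, h1, List.append_assoc]
    · subst hs
      have h1 : ¬s = e := fun h => he h.symm
      simp [he, h1, List.append_assoc]
    · have h1 : ¬k = s := fun h => hs h.symm
      have h2 : ¬k = e := fun h => he h.symm
      simp [he, hs, h1, h2, List.append_assoc]

-- keys stay Nodup through A's build loop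
theorem pv_dict_keys_nodup (sa : List (Int × Int × String)) :
    ∀ (d : PySem.Dict Int (List String)), d.keys.Nodup →
      (sa.foldl (fun d t =>
        (PySem.Dict.modify d t.1 [] (fun v => v ++ [pvFmtOpen t.2.2])).modify t.2.1 []
          (fun v => pvFmtClose t.2.2 :: v)) d).keys.Nodup := by
  induction sa with
  | nil => intro d h; simpa using h
  | cons t rest ih =>
    intro d h
    refine ih _ ?_
    rw [PySem.Dict.keys_modify]
    apply PySem.Dict.nodup_keys_insert
    rw [PySem.Dict.keys_modify]
    exact PySem.Dict.nodup_keys_insert _ _ _ h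

-- membership in the keys after A's build loop
theorem pv_dict_keys_mem (sa : List (Int × Int × String)) :
    ∀ (d : PySem.Dict Int (List String)) (k : Int),
      k ∈ (sa.foldl (fun d t =>
        (PySem.Dict.modify d t.1 [] (fun v => v ++ [pvFmtOpen t.2.2])).modify t.2.1 []
          (fun v => pvFmtClose t.2.2 :: v)) d).keys
      ↔ k ∈ d.keys ∨ ∃ t ∈ sa, k = t.1 ∨ k = t.2.1 := by
  induction sa with
  | nil => intro d k; simp
  | cons t rest ih =>
    intro d k
    rw [List.foldl_cons, ih]
    rw [PySem.Dict.keys_modify, PySem.Dict.mem_keys_insert, PySem.Dict.keys_modify,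
      PySem.Dict.mem_keys_insert]
    constructor
    · rintro ((h | h | h) | ⟨u, hu, h⟩)
      · exact Or.inr ⟨t, List.mem_cons_self .., Or.inr h⟩
      · exact Or.inr ⟨t, List.mem_cons_self .., Or.inl h⟩
      · exact Or.inl h
      · exact Or.inr ⟨u, List.mem_cons_of_mem _ hu, h⟩
    · rintro (h | ⟨u, hu, h⟩)
      · exact Or.inl (Or.inr (Or.inr h))
      · rcases List.mem_cons.mp hu with rfl | hu
        · rcases h with h | h
          · exact Or.inl (Or.inr (Or.inl h))
          · exact Or.inl (Or.inl h)
        · exact Or.inr ⟨u, hu, h⟩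

-- the sorted key list of A's dict equals B's sorted offset set
theorem pv_keys_sorted_eq (sa : List (Int × Int × String)) :
    PySem.List.sorted
      ((sa.foldl (fun d t =>
        (PySem.Dict.modify d t.1 [] (fun v => v ++ [pvFmtOpen t.2.2])).modify t.2.1 []
          (fun v => pvFmtClose t.2.2 :: v)) PySem.Dict.empty).keys) (fun k => k) false
    = PySem.List.sorted
        (PySem.Set.union (PySem.Set.ofList (sa.map (fun t => t.1)))
                         (PySem.Set.ofList (sa.map (fun t => t.2.1)))) (fun k => k) false := by
  apply PySem.List.sorted_eq_sorted_of_perm _ _ _ (fun a b h => h)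
  apply (List.perm_ext_iff_of_nodup ?_ ?_).mpr
  · intro k
    rw [pv_dict_keys_mem]
    simp only [PySem.Dict.keys_empty, List.not_mem_nil, false_or, PySem.Set.mem_union,
      PySem.Set.mem_ofList, List.mem_map]
    constructor
    · rintro ⟨t, ht, h | h⟩
      · exact Or.inl ⟨t, ht, h.symm⟩
      · exact Or.inr ⟨t, ht, h.symm⟩
    · rintro (⟨t, ht, h⟩ | ⟨t, ht, h⟩)
      · exact ⟨t, ht, Or.inl h.symm⟩
      · exact ⟨t, ht, Or.inr h.symm⟩
  · exact pv_dict_keys_nodup sa _ (by exact PySem.Dict.nodup_keys_empty)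
  · exact PySem.Set.nodup_union _ _ (PySem.Set.nodup_ofList _)

-- the running `prev` offset of B's loop
def pvLastO (i : Option Int) : List Int → Option Int
  | [] => i
  | k :: rest => pvLastO (some k) rest

-- the running `prev` offset of A's loop
def pvLastOO (i : Option Int) : List (Option Int) → Option Int
  | [] => i
  | j :: rest => pvLastOO j rest

-- expansion of A's merge loop
def pvExpA (text : String) (d : PySem.Dict Int (List String)) (i : Option Int) :
    List (Option Int) → List String
  | [] => []
  | j :: rest =>
      [PySem.Str.slice text i j,
       PySem.Str.join "" (match j with | some k => d.getD k [] | none => [])]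
      ++ pvExpA text d j rest

-- expansion of B's merge loop
def pvExpB (text : String) (sa : List (Int × Int × String)) (i : Option Int) :
    List Int → List String
  | [] => []
  | k :: rest =>
      [PySem.Str.slice text i (some k)]
      ++ sa.reverse.filterMap (fun t => if t.2.1 == k then some (pvFmtClose t.2.2) else none)
      ++ sa.filterMap (fun t => if t.1 == k then some (pvFmtOpen t.2.2) else none)
      ++ pvExpB text sa (some k) rest

theorem pv_loopA (text : String) (d : PySem.Dict Int (List String)) :
    ∀ (js : List (Option Int)) (acc : List String) (i : Option Int),
      js.foldl (fun (acc : List String × Option Int) j =>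
        (acc.1 ++ [PySem.Str.slice text acc.2 j,
                   PySem.Str.join "" (match j with | some k => d.getD k [] | none => [])], j))
        (acc, i)
      = (acc ++ pvExpA text d i js, pvLastOO i js) := by
  intro js
  induction js with
  | nil => intro acc i; simp [pvExpA, pvLastOO]
  | cons j rest ih =>
    intro acc i
    rw [List.foldl_cons, ih]
    simp [pvExpA, pvLastOO, List.append_assoc]

theorem pv_loopB (text : String) (sa : List (Int × Int × String)) :
    ∀ (ks : List Int) (acc : List String) (i : Option Int),
      ks.foldl (fun (acc : List String × Option Int) pos =>
        (acc.1 ++ [PySem.Str.slice text acc.2 (some pos)]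
              ++ sa.reverse.filterMap (fun t => if t.2.1 == pos then some (pvFmtClose t.2.2) else none)
              ++ sa.filterMap (fun t => if t.1 == pos then some (pvFmtOpen t.2.2) else none),
         some pos)) (acc, i)
      = (acc ++ pvExpB text sa i ks, pvLastO i ks) := by
  intro ks
  induction ks with
  | nil => intro acc i; simp [pvExpB, pvLastO]
  | cons k rest ih =>
    intro acc i
    rw [List.foldl_cons, ih]
    simp [pvExpB, pvLastO, List.append_assoc]

-- auxiliary: flatten ignores empty interspersed separators
theorem pv_flatten_intersperse (l : List (List Char)) :
    (List.intersperse ([] : List Char) l).flatten = l.flatten := by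
  induction l with
  | nil => rfl
  | cons a rest ih =>
    cases rest with
    | nil => rfl
    | cons b r => simpa [List.intersperse] using ih

-- "".join at the character level
theorem pv_join_toList (l : List String) :
    (PySem.Str.join "" l).toList = (l.map String.toList).flatten := by
  simp [PySem.Str.toList_join, PySem.Chars.join, List.intercalate, pv_flatten_intersperse]

-- the heart: the two expansions print the same characters
theorem pv_main (text : String) (sa : List (Int × Int × String))
    (d : PySem.Dict Int (List String))
    (hd : ∀ k, d.getD k [] = (pvClo sa k).reverse ++ pvOp sa k) :
    ∀ (ks : List Int) (i : Option Int),
      ((pvExpA text d i (ks.map Option.some ++ [none])).map String.toList).flatten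
      = ((pvExpB text sa i ks ++ [PySem.Str.slice text (pvLastO i ks) none]).map String.toList).flatten := by
  intro ks
  induction ks with
  | nil => intro i; simp [pvExpA, pvExpB, pvLastO]
  | cons k rest ih =>
    intro i
    simp only [List.map_cons, List.cons_append, pvExpA, pvExpB, pvLastO, List.map_append,
      List.flatten_append, List.flatten_cons, ih, hd, pv_join_toList, List.filterMap_reverse,
      pvClo, pvOp, List.map_reverse]
    simp [List.append_assoc]

-- ===== VERDICT (by name: the statement is the Claim_ definition above) =====
theorem stand_off_to_inline_spec : Claim_equal_stand_off_to_inline := by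
  intro text annot _ _
  unfold Spec_stand_off_to_inline
  simp only [stand_off_to_inline, stand_off_to_inline_alt]
  rw [pv_loopA, pv_loopB, pv_keys_sorted_eq]
  apply String.toList_inj.mp
  rw [pv_join_toList, pv_join_toList]
  simp only [List.nil_append]
  exact pv_main text _ _ (fun k => by rw [pv_dict_getD]; simp [PySem.Dict.getD_empty]) _ none
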